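-- pv_equiv track=rewrite | github.com/Quantum126/Project--01 | A_whole_program.py | wd
-- ===== SOURCE A (Python) =====
-- def wd(equation):
--     b = []
--     for i in equation:
--         if ord(i) in range(97, 122):
--             b.append(i)
--         else:
--             i = '1'
--             b.append(i)
--
--     bb = (''.join(b))
--
--     cc = bb.replace('1', ' ')
--
--     dd = cc.split(' ')
--
--     li = []
--     for i in dd:
--         if i != '':
--             li.append(i)
--
--     return li
-- ===== SOURCE B (Python) =====
-- def wd(equation):
--     result = []
--     current = ''
--     for c in equation:
--         if 97 <= ord(c) < 122:
--             current += c
--         else: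
--             if current:
--                 result.append(current)
--                 current = ''
--     if current:
--         result.append(current)
--     return result
-- ===== Notes on version B (the rewrite author's own statement) =====
-- stated objective: faster
-- what changed: Replaced the build-marker-string / replace / split / filter pipeline (five passes and intermediate strings) by a single accumulator pass that collects maximal runs of chars with 97 <= ord(c) < 122 directly.
import Mathlib
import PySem

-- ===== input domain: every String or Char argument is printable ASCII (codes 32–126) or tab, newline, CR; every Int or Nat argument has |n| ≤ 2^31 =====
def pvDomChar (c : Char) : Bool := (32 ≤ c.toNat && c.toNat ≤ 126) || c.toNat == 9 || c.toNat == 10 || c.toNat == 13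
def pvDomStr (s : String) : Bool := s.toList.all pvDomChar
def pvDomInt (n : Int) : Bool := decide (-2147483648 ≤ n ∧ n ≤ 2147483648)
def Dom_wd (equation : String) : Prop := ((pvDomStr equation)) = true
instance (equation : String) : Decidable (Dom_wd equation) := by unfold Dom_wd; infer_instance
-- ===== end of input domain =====

-- B replaces A's mark/replace/split/filter pipeline by one accumulator pass over the chars (constant-factor speedup).

-- ===== PORT A =====
-- literal port of A: build b (letters kept, everything else becomes '1'), join,
-- replace '1' by ' ', split on ' ', keep the non-empty pieces.
def wd (equation : String) : List String :=
  -- b = marker chars; bb = ''.join(b); cc = bb.replace('1',' '); dd = cc.split(' '); keep non-empty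
  ((PySem.Chars.splitOn
      (PySem.Chars.replace
        (equation.toList.foldl
          (fun acc i => if 97 ≤ i.toNat ∧ i.toNat < 122 then acc ++ [i] else acc ++ ['1']) [])
        ['1'] [' '])
      [' ']).foldl (fun li i => if i ≠ [] then li ++ [i] else li) []).map String.ofList

-- ===== PORT B =====
-- single pass: (result, current) accumulator, push current on each non-letter boundary
def wd_alt (equation : String) : List String :=
  (fun p => (if p.2 ≠ [] then p.1 ++ [p.2] else p.1).map String.ofList)
    (equation.toList.foldl
      (fun (p : List (List Char) × List Char) c =>
        if 97 ≤ c.toNat ∧ c.toNat < 122 then (p.1, p.2 ++ [c])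
        else if p.2 ≠ [] then (p.1 ++ [p.2], []) else (p.1, []))
      ([], []))

-- ===== PRECONDITION & SPEC =====
def Spec_wd (equation : String) (out : List String) : Prop := out = wd_alt equation
instance (equation : String) (out : List String) : Decidable (Spec_wd equation out) := by unfold Spec_wd; infer_instance

-- ===== CLAIM (what is proved, stated in full; the proofs are below) =====
def Claim_equal_wd : Prop := ∀ (equation : String), Dom_wd equation → Spec_wd equation (wd equation)

-- ===== LEMMAS AND PROOFS =====

-- the "else-everything" marker map of A's first loop
def pvMark (c : Char) : Char := if 97 ≤ c.toNat ∧ c.toNat < 122 then c else '1'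

-- replace '1' ' ' acts pointwise
def pvRepl (c : Char) : Char := if c = '1' then ' ' else c

-- recursive characterization of splitOn on a single-char separator
def pvSplit : List Char → List Char → List (List Char)
  | [], cur => [cur.reverse]
  | c :: rest, cur => if c = ' ' then cur.reverse :: pvSplit rest [] else pvSplit rest (c :: cur)

-- the maximal-run grouping B computes
def pvRuns : List Char → List Char → List (List Char)
  | [], cur => if cur = [] then [] else [cur]
  | c :: rest, cur =>
      if 97 ≤ c.toNat ∧ c.toNat < 122 then pvRuns rest (cur ++ [c])
      else (if cur = [] then [] else [cur]) ++ pvRuns rest []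

lemma replace_go_map (l : List Char) : ∀ (fuel : Nat) (acc : List Char), l.length ≤ fuel →
    PySem.Chars.replace.go ['1'] [' '] fuel l acc = acc.reverse ++ l.map pvRepl := by
  induction l with
  | nil =>
    intro fuel acc _
    cases fuel <;> simp [PySem.Chars.replace.go]
  | cons c rest ih =>
    intro fuel acc hle
    cases fuel with
    | zero => simp at hle
    | succ n =>
      simp only [PySem.Chars.replace.go]
      by_cases h : c = '1'
      · simp [h, List.isPrefixOf, ih n _ (by simpa using hle), pvRepl]
      · have : ('1' == c) = false := by simpa using fun hc => h hc.symm
        simp [List.isPrefixOf, this, ih n _ (by simpa using hle), pvRepl, h]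

lemma replace_eq_map (l : List Char) :
    PySem.Chars.replace l ['1'] [' '] = l.map pvRepl := by
  simpa using replace_go_map l l.length [] le_rfl

lemma splitOn_go_eq (l : List Char) : ∀ (fuel : Nat) (cur : List Char) (acc : List (List Char)),
    l.length ≤ fuel →
    PySem.Chars.splitOn.go [' '] fuel l cur acc = acc.reverse ++ pvSplit l cur := by
  induction l with
  | nil =>
    intro fuel cur acc _
    cases fuel <;> simp [PySem.Chars.splitOn.go, pvSplit]
  | cons c rest ih =>
    intro fuel cur acc hle
    cases fuel with
    | zero => simp at hle
    | succ n =>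
      simp only [PySem.Chars.splitOn.go]
      by_cases h : c = ' '
      · have : (' ' == c) = true := by simp [h]
        simp [List.isPrefixOf, h, ih n _ _ (by simpa using hle), pvSplit]
      · have : (' ' == c) = false := by simpa using fun hc => h hc.symm
        simp [List.isPrefixOf, this, ih n _ _ (by simpa using hle), pvSplit, h]

lemma splitOn_eq (l : List Char) :
    PySem.Chars.splitOn l [' '] = pvSplit l [] := by
  simpa using splitOn_go_eq l (l.length + 1) [] [] (by omega)

-- filtering the split of the marked string gives exactly the runs
lemma filter_split_runs (l : List Char) : ∀ (cur : List Char),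
    ((pvSplit ((l.map pvMark).map pvRepl) cur).filter (fun i => decide (i ≠ [])))
      = pvRuns l cur.reverse := by
  induction l with
  | nil =>
    intro cur
    by_cases h : cur = [] <;> simp [pvSplit, pvRuns, h]
  | cons c rest ih =>
    intro cur
    by_cases h : 97 ≤ c.toNat ∧ c.toNat < 122
    · have hc1 : c ≠ '1' := by
        intro hc; rw [hc] at h; simp at h
      have hcs : c ≠ ' ' := by
        intro hc; rw [hc] at h; simp at h
      simp only [List.map_cons, pvMark, pvRepl, if_pos h, if_neg hc1]
      simpa [pvSplit, hcs, pvRuns, h] using ih (c :: cur)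
    · simp only [List.map_cons, pvMark, pvRepl, if_neg h]
      by_cases hc : cur = [] <;>
        simpa [pvSplit, pvRuns, h, hc] using ih []

-- B's paired foldl computes the runs
lemma foldl_runs (l : List Char) : ∀ (res : List (List Char)) (cur : List Char),
    (let p := l.foldl
      (fun (p : List (List Char) × List Char) c =>
        if 97 ≤ c.toNat ∧ c.toNat < 122 then (p.1, p.2 ++ [c])
        else if p.2 ≠ [] then (p.1 ++ [p.2], []) else (p.1, []))
      (res, cur)
     (if p.2 ≠ [] then p.1 ++ [p.2] else p.1)) = res ++ pvRuns l cur := by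
  induction l with
  | nil =>
    intro res cur
    by_cases h : cur = [] <;> simp [pvRuns, h]
  | cons c rest ih =>
    intro res cur
    by_cases h : 97 ≤ c.toNat ∧ c.toNat < 122
    · simpa [pvRuns, h] using ih res (cur ++ [c])
    · by_cases hc : cur = []
      · simpa [pvRuns, h, hc] using ih res []
      · simpa [pvRuns, h, hc] using ih (res ++ [cur]) []

-- A's first loop is a map, A's last loop is a filter
lemma mark_foldl (l : List Char) :
    l.foldl (fun acc i => if 97 ≤ i.toNat ∧ i.toNat < 122 then acc ++ [i] else acc ++ ['1']) []
      = l.map pvMark := by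
  have h : (fun (acc : List Char) i =>
      if 97 ≤ i.toNat ∧ i.toNat < 122 then acc ++ [i] else acc ++ ['1'])
      = fun acc i => acc ++ [pvMark i] := by
    funext acc i; by_cases h : 97 ≤ i.toNat ∧ i.toNat < 122 <;> simp [pvMark, h]
  rw [h]
  simpa using PySem.List.foldl_append_singleton_eq_map pvMark l []

lemma keep_foldl (ds : List (List Char)) :
    ds.foldl (fun li i => if i ≠ [] then li ++ [i] else li) []
      = ds.filter (fun i => decide (i ≠ [])) := by
  have h : (fun (li : List (List Char)) i => if i ≠ [] then li ++ [i] else li)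
      = fun li i => if (fun j => decide (j ≠ ([] : List Char))) i = true then li ++ [id i] else li := by
    funext li i; by_cases h : i = [] <;> simp [h]
  rw [h, PySem.List.foldl_append_if]
  simp

-- ===== VERDICT (by name: the statement is the Claim_ definition above) =====
theorem wd_spec : Claim_equal_wd := by
  intro equation _
  unfold Spec_wd wd wd_alt
  rw [mark_foldl, replace_eq_map, splitOn_eq, keep_foldl]
  rw [filter_split_runs equation.toList []]
  have h := foldl_runs equation.toList [] []
  simp only [List.nil_append] at h
  simp [← h]
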